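-- pv_equiv track=rewrite | github.com/jmbotero/algorithms | sudoku.py | __belongtosame_rowindexset
-- ===== SOURCE A (Python) =====
-- def __belongtosame_rowindexset(indices, tuplelength):
--     indexranges = [[0, 1, 2], [3, 4, 5], [6, 7, 8]]
--
--     tuplematch = False
--     for r in indexranges:
--         match_count = 0
--         for i in indices:
--             if i in r:
--                 match_count += 1
--         if match_count == tuplelength:
--             tuplematch = True
--
--     return tuplematch
-- ===== SOURCE B (Python) =====
-- def __belongtosame_rowindexset(indices, tuplelength):
--     counts = {}
--     for i in indices:
--         if i in range(9):
--             g = i // 3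
--             counts[g] = counts.get(g, 0) + 1
--     return any(counts.get(g, 0) == tuplelength for g in (0, 1, 2))
-- ===== Notes on version B (the rewrite author's own statement) =====
-- stated objective: alternative
-- what changed: Replaces three repeated membership scans over the index list with a single bucketing pass that counts indices per row-group in a dict, then checks the three group counts against tuplelength.
import Mathlib
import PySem

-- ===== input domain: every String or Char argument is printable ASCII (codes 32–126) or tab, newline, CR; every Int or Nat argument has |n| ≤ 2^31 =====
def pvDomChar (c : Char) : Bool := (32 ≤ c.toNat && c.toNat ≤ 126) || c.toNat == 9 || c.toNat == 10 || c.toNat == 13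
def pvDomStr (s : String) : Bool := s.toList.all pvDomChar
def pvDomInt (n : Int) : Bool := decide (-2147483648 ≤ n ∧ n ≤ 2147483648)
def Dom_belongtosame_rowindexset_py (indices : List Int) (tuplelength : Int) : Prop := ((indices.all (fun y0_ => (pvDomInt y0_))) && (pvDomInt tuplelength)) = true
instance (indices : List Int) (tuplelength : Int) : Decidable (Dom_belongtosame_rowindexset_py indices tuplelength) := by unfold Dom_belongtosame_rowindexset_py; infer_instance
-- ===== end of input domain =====

-- B replaces A's three membership scans over the index list with one bucketing
-- pass counting indices per row-group in a dict, then checks the three group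
-- counts (objective: alternative decomposition, same cost).

-- ===== PORT A =====
def belongtosame_rowindexset_py (indices : List Int) (tuplelength : Int) : Bool :=
  let indexranges : List (List Int) := [[0, 1, 2], [3, 4, 5], [6, 7, 8]]
  indexranges.foldl
    (fun tuplematch r =>
      let match_count : Int :=
        indices.foldl (fun c i => if r.contains i then c + 1 else c) 0
      if match_count == tuplelength then true else tuplematch)
    false

-- ===== PORT B =====
def belongtosame_rowindexset_py_alt (indices : List Int) (tuplelength : Int) : Bool :=
  let counts : PySem.Dict Int Int :=
    indices.foldl
      (fun d i =>
        if 0 ≤ i ∧ i < 9 then           -- `i in range(9)`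
          let g := PySem.Int.floordiv i 3
          d.insert g (d.getD g 0 + 1)
        else d)
      PySem.Dict.empty
  [(0 : Int), 1, 2].any (fun g => counts.getD g 0 == tuplelength)

-- ===== PRECONDITION & SPEC =====
def Spec_belongtosame_rowindexset_py (indices : List Int) (tuplelength : Int) (out : Bool) : Prop := out = belongtosame_rowindexset_py_alt indices tuplelength
instance (indices : List Int) (tuplelength : Int) (out : Bool) : Decidable (Spec_belongtosame_rowindexset_py indices tuplelength out) := by unfold Spec_belongtosame_rowindexset_py; infer_instance

-- ===== CLAIM (what is proved, stated in full; the proofs are below) =====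
def Claim_equal_belongtosame_rowindexset_py : Prop := ∀ (indices : List Int) (tuplelength : Int), Dom_belongtosame_rowindexset_py indices tuplelength → Spec_belongtosame_rowindexset_py indices tuplelength (belongtosame_rowindexset_py indices tuplelength)

-- ===== LEMMAS AND PROOFS =====

-- A's inner loop is a countP.
theorem pv_foldl_count (l : List Int) (p : Int → Bool) (c : Int) :
    l.foldl (fun c i => if p i then c + 1 else c) c = c + (l.countP p : Int) := by
  induction l generalizing c with
  | nil => simp
  | cons x xs ih =>
      simp only [List.foldl_cons, List.countP_cons]
      by_cases h : p x
      · rw [if_pos h, ih]; simp [h]; ring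
      · rw [if_neg h, ih]; simp [h]

-- B's dict after the bucketing pass holds, at each key, the count of in-range
-- indices whose group is that key.
theorem pv_dict_count (l : List Int) (d : PySem.Dict Int Int) (g : Int) :
    (l.foldl
      (fun d i =>
        if 0 ≤ i ∧ i < 9 then
          d.insert (PySem.Int.floordiv i 3) (d.getD (PySem.Int.floordiv i 3) 0 + 1)
        else d) d).getD g 0
    = d.getD g 0 + (l.countP (fun i => decide (0 ≤ i ∧ i < 9) && (PySem.Int.floordiv i 3 == g)) : Int) := by
  induction l generalizing d with
  | nil => simp
  | cons x xs ih =>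
      simp only [List.foldl_cons, List.countP_cons]
      have h3 : PySem.Int.floordiv x 3 = x / 3 :=
        PySem.Int.floordiv_eq_ediv_of_pos (by norm_num)
      by_cases hr : 0 ≤ x ∧ x < 9
      · rw [if_pos hr, ih, PySem.Dict.getD_insert, h3]
        by_cases hg : x / 3 = g
        · rw [if_pos hg.symm, hg]
          simp [hr]
          ring
        · rw [if_neg (fun h => hg h.symm)]
          simp [hg]
      · rw [if_neg hr, ih]
        simp [hr]

-- For each of the three groups, A's list-membership test coincides with B's
-- range-and-floordiv test, so the two counts agree.
theorem pv_count_eq (l : List Int) (g : Int) (hg : g = 0 ∨ g = 1 ∨ g = 2) :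
    l.countP (fun i => [3 * g, 3 * g + 1, 3 * g + 2].contains i)
    = l.countP (fun i => decide (0 ≤ i ∧ i < 9) && (PySem.Int.floordiv i 3 == g)) := by
  apply List.countP_congr
  intro a _
  have h3 : PySem.Int.floordiv a 3 = a / 3 :=
    PySem.Int.floordiv_eq_ediv_of_pos (by norm_num)
  rcases hg with rfl | rfl | rfl <;> simp [List.contains_eq_mem] <;> omega

-- ===== VERDICT (by name: the statement is the Claim_ definition above) =====
theorem belongtosame_rowindexset_py_spec : Claim_equal_belongtosame_rowindexset_py := by
  intro indices tuplelength _
  unfold Spec_belongtosame_rowindexset_py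
  unfold belongtosame_rowindexset_py belongtosame_rowindexset_py_alt
  simp only [List.foldl_cons, List.foldl_nil, List.any_cons, List.any_nil, Bool.or_false]
  rw [pv_foldl_count, pv_foldl_count, pv_foldl_count]
  rw [pv_dict_count, pv_dict_count, pv_dict_count]
  have h0 := pv_count_eq indices 0 (Or.inl rfl)
  have h1 := pv_count_eq indices 1 (Or.inr (Or.inl rfl))
  have h2 := pv_count_eq indices 2 (Or.inr (Or.inr rfl))
  norm_num at h0 h1 h2 ⊢
  rw [← h0, ← h1, ← h2]
  have e0 : ([0, 1, 2] : List Int).contains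
      = fun i => decide (i = 0) || (decide (i = 1) || decide (i = 2)) := by
    funext i; simp [List.contains_eq_mem]
  have e1 : ([3, 4, 5] : List Int).contains
      = fun i => decide (i = 3) || (decide (i = 4) || decide (i = 5)) := by
    funext i; simp [List.contains_eq_mem]
  have e2 : ([6, 7, 8] : List Int).contains
      = fun i => decide (i = 6) || (decide (i = 7) || decide (i = 8)) := by
    funext i; simp [List.contains_eq_mem]
  rw [e0, e1, e2]
  rw [Bool.eq_iff_iff]
  simp only [Bool.or_eq_true, decide_eq_true_eq, beq_iff_eq]
  tauto
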